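-- pv_equiv track=rewrite | github.com/Alina74/OddandEvenSort | solution.py | solve
-- ===== SOURCE A (Python) =====
-- def quicksort(array):
--     if len(array) < 2:
--         return array
--     else:
--         pivot = array[0]
--         less = [i for i in array[1:] if i <= pivot]
--         greater = [i for i in array[1:] if i > pivot]
--     return quicksort(less) + [pivot] + quicksort(greater)
--
-- def solve(source):
--     odd_arr = [x for x in source if x % 2 == 1]
--     even_arr = [x for x in source if x % 2 == 0]
--
--     odd_arr = quicksort(odd_arr)
--     even_arr = quicksort(even_arr)
--
--     odd_arr.reverse()
--
--     res = even_arr + odd_arr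
--
--     return res
-- ===== SOURCE B (Python) =====
-- def solve(source):
--     return sorted(source, key=lambda x: (x % 2, x if x % 2 == 0 else -x))
-- ===== Notes on version B (the rewrite author's own statement) =====
-- stated objective: faster
-- what changed: Replaced A's partition into evens/odds, two hand-written recursive quicksorts, a reverse and a concatenation by ONE builtin sort with the composite key (x % 2, x if even else -x), whose lexicographic order yields evens ascending followed by odds descending directly; A's first-element-pivot quicksort degenerates to O(n^2) on duplicate-heavy or sorted input while B stays O(n log n).
import Mathlib
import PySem

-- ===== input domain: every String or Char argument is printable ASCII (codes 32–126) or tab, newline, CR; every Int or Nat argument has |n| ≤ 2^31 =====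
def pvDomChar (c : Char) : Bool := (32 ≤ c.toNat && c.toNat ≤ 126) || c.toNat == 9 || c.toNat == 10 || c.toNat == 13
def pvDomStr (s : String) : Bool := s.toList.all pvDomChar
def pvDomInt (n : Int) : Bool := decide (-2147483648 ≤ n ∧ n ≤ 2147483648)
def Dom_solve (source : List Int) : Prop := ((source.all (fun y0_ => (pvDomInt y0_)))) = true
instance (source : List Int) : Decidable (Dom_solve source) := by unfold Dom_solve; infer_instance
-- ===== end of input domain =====

-- B replaces A's partition / hand-written quicksorts / reverse / concatenate with ONE builtin sort
-- on the composite key (x % 2, x if even else -x); same return value on every input.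

-- ===== PORT A =====
-- literal port of quicksort: len<2 check, pivot = array[0], array[1:] = rest, the two filters, concat
def quicksort (array : List Int) : List Int :=
  if array.length < 2 then array
  else
    match array with
    | [] => []
    | pivot :: rest =>
      quicksort (rest.filter (fun i => i ≤ pivot)) ++ [pivot] ++
        quicksort (rest.filter (fun i => pivot < i))
termination_by array.length
decreasing_by
  all_goals
    simpa using Nat.lt_succ_of_le ((List.length_filter_le _ _).trans (by simp))

def solve (source : List Int) : List Int :=
  let odd_arr := source.filter (fun x => PySem.Int.mod x 2 = 1)
  let even_arr := source.filter (fun x => PySem.Int.mod x 2 = 0)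
  let odd_arr := quicksort odd_arr
  let even_arr := quicksort even_arr
  let odd_arr := odd_arr.reverse
  even_arr ++ odd_arr

-- ===== PORT B =====
-- the Python tuple key (x % 2, x if x % 2 == 0 else -x); tuple comparison is lexicographic = Lex (Int × Int)
def pkey (x : Int) : Lex (Int × Int) :=
  toLex (PySem.Int.mod x 2, if PySem.Int.mod x 2 = 0 then x else -x)

def solve_alt (source : List Int) : List Int :=
  PySem.List.sorted source pkey

-- ===== PRECONDITION & SPEC =====
def Spec_solve (source : List Int) (out : List Int) : Prop := out = solve_alt source
instance (source : List Int) (out : List Int) : Decidable (Spec_solve source out) := by unfold Spec_solve; infer_instance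

-- ===== CLAIM (what is proved, stated in full; the proofs are below) =====
def Claim_equal_solve : Prop := ∀ (source : List Int), Dom_solve source → Spec_solve source (solve source)

-- ===== LEMMAS AND PROOFS =====

lemma mod2_cases (x : Int) : PySem.Int.mod x 2 = 0 ∨ PySem.Int.mod x 2 = 1 := by
  have h1 := PySem.Int.mod_nonneg x (b := 2) (by norm_num)
  have h2 := PySem.Int.mod_lt x (b := 2) (by norm_num)
  omega

lemma pkey_injective : Function.Injective pkey := by
  intro x y h
  unfold pkey at h
  have h' := congrArg ofLex h
  have h1 : PySem.Int.mod x 2 = PySem.Int.mod y 2 := congrArg Prod.fst h'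
  have h2 := congrArg Prod.snd h'
  simp only [ofLex_toLex] at h1 h2
  rcases mod2_cases x with hx | hx <;> rcases mod2_cases y with hy | hy
  · rwa [if_pos hx, if_pos hy] at h2
  · rw [hx, hy] at h1; exact absurd h1 (by norm_num)
  · rw [hx, hy] at h1; exact absurd h1 (by norm_num)
  · rw [if_neg (by rw [hx]; norm_num), if_neg (by rw [hy]; norm_num)] at h2
    omega

lemma quicksort_perm (l : List Int) : (quicksort l).Perm l := by
  fun_induction quicksort l with
  | case1 l h => exact List.Perm.refl l
  | case2 h => exact List.Perm.refl []
  | case3 pivot rest h ih1 ih2 =>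
    rw [List.unattach_filter (g := fun i => decide (i ≤ pivot)) (hf := fun x h => rfl),
      List.unattach_attach] at ih1
    rw [List.unattach_filter (g := fun i => decide (pivot < i)) (hf := fun x h => rfl),
      List.unattach_attach] at ih2
    refine ((ih1.append (List.Perm.refl [pivot])).append ih2).trans ?_
    have hmid : (List.filter (fun i => decide (i ≤ pivot)) rest ++ [pivot] ++
        List.filter (fun i => decide (pivot < i)) rest).Perm
        (pivot :: (List.filter (fun i => decide (i ≤ pivot)) rest ++
          List.filter (fun i => decide (pivot < i)) rest)) := by
      rw [List.append_assoc, List.singleton_append]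
      exact List.perm_middle
    refine hmid.trans (List.Perm.cons _ ?_)
    have heq : List.filter (fun i => decide (pivot < i)) rest =
        List.filter (fun x => !decide (x ≤ pivot)) rest :=
      List.filter_congr (fun x _ => by rw [← decide_not]; simp [not_le])
    rw [heq]
    exact List.filter_append_perm _ rest

lemma quicksort_sorted (l : List Int) : (quicksort l).Pairwise (· ≤ ·) := by
  fun_induction quicksort l with
  | case1 l h =>
    rcases l with _ | ⟨a, _ | ⟨c, t⟩⟩
    · exact List.Pairwise.nil
    · exact List.pairwise_singleton _ a
    · simp at h
  | case2 h => exact List.Pairwise.nil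
  | case3 pivot rest h ih1 ih2 =>
    rw [List.unattach_filter (g := fun i => decide (i ≤ pivot)) (hf := fun x h => rfl),
      List.unattach_attach] at ih1
    rw [List.unattach_filter (g := fun i => decide (pivot < i)) (hf := fun x h => rfl),
      List.unattach_attach] at ih2
    rw [List.append_assoc, List.pairwise_append]
    refine ⟨ih1, ?_, ?_⟩
    · rw [List.singleton_append, List.pairwise_cons]
      refine ⟨?_, ih2⟩
      intro b hb
      have hb' := (quicksort_perm _).mem_iff.mp hb
      have := List.of_mem_filter hb'
      simp at this
      omega
    · intro a ha b hb
      have ha' := (quicksort_perm _).mem_iff.mp ha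
      have hale : a ≤ pivot := by simpa using List.of_mem_filter ha'
      rcases List.mem_cons.mp (by simpa using hb) with rfl | hb2
      · exact hale
      · have hb' := (quicksort_perm _).mem_iff.mp hb2
        have : pivot < b := by simpa using List.of_mem_filter hb'
        omega

-- lex ≤ on keys from facts about the components
lemma pkey_le_of_even_even {x y : Int} (hx : PySem.Int.mod x 2 = 0)
    (hy : PySem.Int.mod y 2 = 0) (hxy : x ≤ y) : pkey x ≤ pkey y := by
  unfold pkey
  rw [Prod.Lex.toLex_le_toLex]
  refine Or.inr ⟨by rw [hx, hy], ?_⟩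
  rw [if_pos hx, if_pos hy]
  exact hxy

lemma pkey_le_of_odd_odd {x y : Int} (hx : PySem.Int.mod x 2 = 1)
    (hy : PySem.Int.mod y 2 = 1) (hxy : y ≤ x) : pkey x ≤ pkey y := by
  unfold pkey
  rw [Prod.Lex.toLex_le_toLex]
  refine Or.inr ⟨by rw [hx, hy], ?_⟩
  rw [if_neg (by rw [hx]; norm_num), if_neg (by rw [hy]; norm_num)]
  omega

lemma pkey_le_of_even_odd {x y : Int} (hx : PySem.Int.mod x 2 = 0)
    (hy : PySem.Int.mod y 2 = 1) : pkey x ≤ pkey y := by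
  unfold pkey
  rw [Prod.Lex.toLex_le_toLex]
  refine Or.inl ?_
  rw [hx, hy]
  norm_num

-- A's result is a permutation of source
lemma solve_perm (source : List Int) : (solve source).Perm source := by
  unfold solve
  simp only
  have h1 : (quicksort (source.filter (fun x => PySem.Int.mod x 2 = 0))).Perm
      (source.filter (fun x => PySem.Int.mod x 2 = 0)) := quicksort_perm _
  have h2 : ((quicksort (source.filter (fun x => PySem.Int.mod x 2 = 1))).reverse).Perm
      (source.filter (fun x => PySem.Int.mod x 2 = 1)) :=
    (List.reverse_perm _).trans (quicksort_perm _)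
  refine (h1.append h2).trans ?_
  have := List.filter_append_perm (fun x => decide (PySem.Int.mod x 2 = 0)) source
  have heq : (source.filter fun x => !decide (PySem.Int.mod x 2 = 0)) =
      (source.filter fun x => decide (PySem.Int.mod x 2 = 1)) := by
    apply List.filter_congr
    intro x _
    rcases mod2_cases x with hx | hx <;> rw [hx] <;> decide
  rw [heq] at this
  simpa using this

-- A's result is pairwise nondecreasing under pkey
lemma solve_pairwise (source : List Int) :
    (solve source).Pairwise (fun a b => pkey a ≤ pkey b) := by
  unfold solve
  simp only
  rw [List.pairwise_append]
  have meme : ∀ a ∈ quicksort (source.filter (fun x => PySem.Int.mod x 2 = 0)),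
      PySem.Int.mod a 2 = 0 := by
    intro a ha
    have := (quicksort_perm _).mem_iff.mp ha
    simpa using List.of_mem_filter this
  have memo : ∀ a ∈ (quicksort (source.filter (fun x => PySem.Int.mod x 2 = 1))).reverse,
      PySem.Int.mod a 2 = 1 := by
    intro a ha
    rw [List.mem_reverse] at ha
    have := (quicksort_perm _).mem_iff.mp ha
    simpa using List.of_mem_filter this
  refine ⟨?_, ?_, ?_⟩
  · refine (quicksort_sorted _).imp_of_mem ?_
    intro a b ha hb hab
    exact pkey_le_of_even_even (meme a ha) (meme b hb) hab
  · rw [List.pairwise_reverse]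
    refine (quicksort_sorted _).imp_of_mem ?_
    intro a b ha hb hab
    refine pkey_le_of_odd_odd ?_ ?_ hab
    · have := (quicksort_perm _).mem_iff.mp hb
      simpa using List.of_mem_filter this
    · have := (quicksort_perm _).mem_iff.mp ha
      simpa using List.of_mem_filter this
  · intro a ha b hb
    exact pkey_le_of_even_odd (meme a ha) (memo b hb)

-- ===== VERDICT (by name: the statement is the Claim_ definition above) =====
theorem solve_spec : Claim_equal_solve := by
  intro source _
  unfold Spec_solve solve_alt
  exact PySem.List.eq_of_perm_of_pairwise_le_of_injective pkey pkey_injective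
    ((solve_perm source).trans (PySem.List.sorted_perm source pkey false).symm)
    (solve_pairwise source)
    (PySem.List.sorted_pairwise source pkey)
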